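-- pv_equiv track=rewrite | github.com/fdiazgilg/calculadora_r | calculator.py | openParenthesis
-- ===== SOURCE A (Python) =====
-- def openParenthesis(cadena):
--     nP = 0
--     for caracter in cadena:
--         if caracter == '(':
--             nP +=1
--         if caracter == ')':
--             nP -=1
--     return nP
-- ===== SOURCE B (Python) =====
-- def openParenthesis(cadena):
--     # Stack-based matcher: unmatched opens live on the stack, unmatched
--     # closes are tallied in deficit; the net result is their difference.
--     stack = []
--     deficit = 0
--     for caracter in cadena:
--         if caracter == '(':
--             stack.append(caracter)
--         elif caracter == ')':
--             if stack:
--                 stack.pop()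
--             else:
--                 deficit += 1
--     return len(stack) - deficit
-- ===== Notes on version B (the rewrite author's own statement) =====
-- stated objective: alternative
-- what changed: Replaces the running net counter with the classic stack-based parenthesis matcher: '(' pushes onto a stack, ')' pops a matched open when the stack is nonempty and otherwise increments an unmatched-close deficit; the result is len(stack) - deficit, since each matched pair cancels one open and one close.
import Mathlib
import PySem

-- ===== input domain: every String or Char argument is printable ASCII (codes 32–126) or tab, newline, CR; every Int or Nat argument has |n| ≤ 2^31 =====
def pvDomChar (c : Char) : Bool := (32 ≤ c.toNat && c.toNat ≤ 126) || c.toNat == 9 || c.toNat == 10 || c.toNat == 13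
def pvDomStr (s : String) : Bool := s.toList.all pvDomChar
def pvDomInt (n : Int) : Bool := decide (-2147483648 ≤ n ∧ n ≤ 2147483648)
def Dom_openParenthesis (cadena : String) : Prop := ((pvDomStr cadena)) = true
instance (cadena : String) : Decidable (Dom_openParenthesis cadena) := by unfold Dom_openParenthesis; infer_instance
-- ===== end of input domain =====

-- B replaces A's running net counter by the stack-based parenthesis matcher
-- (unmatched opens on a stack, unmatched closes as a deficit); objective: alternative.

-- ===== PORT A =====
-- literal port: one pass, running counter, two independent ifs per character
def openParenthesis (cadena : String) : Int :=
  cadena.toList.foldl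
    (fun nP caracter =>
      let nP := if caracter = '(' then nP + 1 else nP
      if caracter = ')' then nP - 1 else nP)
    0

-- ===== PORT B =====
-- stack of unmatched '(' plus deficit of unmatched ')'; result = len(stack) - deficit
def openParenthesis_alt (cadena : String) : Int :=
  let st :=
    cadena.toList.foldl
      (fun (s : List Char × Int) caracter =>
        if caracter = '(' then (caracter :: s.1, s.2)
        else if caracter = ')' then
          match s.1 with
          | _ :: rest => (rest, s.2)
          | [] => (s.1, s.2 + 1)
        else s)
      ([], 0)
  (st.1.length : Int) - st.2

-- ===== PRECONDITION & SPEC =====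
def Spec_openParenthesis (cadena : String) (out : Int) : Prop := out = openParenthesis_alt cadena
instance (cadena : String) (out : Int) : Decidable (Spec_openParenthesis cadena out) := by unfold Spec_openParenthesis; infer_instance

-- ===== CLAIM (what is proved, stated in full; the proofs are below) =====
def Claim_equal_openParenthesis : Prop := ∀ (cadena : String), Dom_openParenthesis cadena → Spec_openParenthesis cadena (openParenthesis cadena)

-- ===== LEMMAS AND PROOFS =====

-- A's fold equals the initial value plus count '(' minus count ')'
theorem pv_foldA_eq (l : List Char) : ∀ (a : Int),
    l.foldl (fun nP caracter =>
      let nP := if caracter = '(' then nP + 1 else nP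
      if caracter = ')' then nP - 1 else nP) a
    = a + (l.count '(' : Int) - (l.count ')' : Int) := by
  induction l with
  | nil => intro a; simp
  | cons h t ih =>
    intro a
    simp only [List.foldl_cons, List.count_cons, ih]
    by_cases h1 : h = '(' <;> by_cases h2 : h = ')' <;> simp_all <;> ring

-- B's stack/deficit fold invariant: stack length minus deficit tracks the net count
theorem pv_foldB_eq (l : List Char) : ∀ (st : List Char × Int),
    (let r := l.foldl
      (fun (s : List Char × Int) caracter =>
        if caracter = '(' then (caracter :: s.1, s.2)
        else if caracter = ')' then
          match s.1 with
          | _ :: rest => (rest, s.2)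
          | [] => (s.1, s.2 + 1)
        else s) st
     (r.1.length : Int) - r.2)
    = (st.1.length : Int) - st.2 + (l.count '(' : Int) - (l.count ')' : Int) := by
  induction l with
  | nil => intro st; simp
  | cons h t ih =>
    intro st
    simp only [List.foldl_cons, List.count_cons]
    by_cases h1 : h = '('
    · simp only [if_pos h1, ih]
      simp [h1]
      ring
    · by_cases h2 : h = ')'
      · simp only [if_neg h1, if_pos h2]
        cases hs : st.1 with
        | nil =>
          simp only [ih]
          simp [hs, h2]
          ring
        | cons x rest =>
          simp only [ih]
          simp [h2]
          ring
      · simp only [if_neg h1, if_neg h2, ih]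
        simp [h1, h2]

-- ===== VERDICT (by name: the statement is the Claim_ definition above) =====
theorem openParenthesis_spec : Claim_equal_openParenthesis := by
  intro cadena _
  unfold Spec_openParenthesis openParenthesis openParenthesis_alt
  rw [pv_foldA_eq cadena.toList 0]
  have h := pv_foldB_eq cadena.toList ([], 0)
  simp only at h
  rw [h]
  simp
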